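-- pv_equiv track=rewrite | github.com/V0raOnline/MemorIA | MemorIA/scripts/CleanImageToolBlocks.py | find_balanced_blocks
-- ===== SOURCE A (Python) =====
-- def find_balanced_blocks(section_text: str):
--     """Encuentra bloques { ... } con llaves anidadas correctamente balanceadas."""
--     blocks = []
--     i = 0
--     n = len(section_text)
--     while i < n:
--         if section_text[i] == '{':
--             start = i
--             depth = 1
--             i += 1
--             while i < n and depth > 0:
--                 if section_text[i] == '{':
--                     depth += 1
--                 elif section_text[i] == '}':
--                     depth -= 1
--                 i += 1
--             end = i
--             blocks.append((start, end))
--         else: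
--             i += 1
--     return blocks
-- ===== SOURCE B (Python) =====
-- def find_balanced_blocks(section_text: str):
--     """Single flat pass with a stack of '{' indices instead of nested loops."""
--     blocks = []
--     stack = []
--     for i, ch in enumerate(section_text):
--         if ch == '{':
--             stack.append(i)
--         elif ch == '}' and stack:
--             start = stack.pop()
--             if not stack:
--                 blocks.append((start, i + 1))
--     if stack:
--         blocks.append((stack[0], len(section_text)))
--     return blocks
-- ===== Notes on version B (the rewrite author's own statement) =====
-- stated objective: idiomatic
-- what changed: Replaces A's nested outer/inner while loops with depth counter and index jumps by a single flat enumerate pass maintaining a stack of opening-brace indices, emitting a block when the stack empties and one trailing unclosed block from the stack bottom.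
import Mathlib
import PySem

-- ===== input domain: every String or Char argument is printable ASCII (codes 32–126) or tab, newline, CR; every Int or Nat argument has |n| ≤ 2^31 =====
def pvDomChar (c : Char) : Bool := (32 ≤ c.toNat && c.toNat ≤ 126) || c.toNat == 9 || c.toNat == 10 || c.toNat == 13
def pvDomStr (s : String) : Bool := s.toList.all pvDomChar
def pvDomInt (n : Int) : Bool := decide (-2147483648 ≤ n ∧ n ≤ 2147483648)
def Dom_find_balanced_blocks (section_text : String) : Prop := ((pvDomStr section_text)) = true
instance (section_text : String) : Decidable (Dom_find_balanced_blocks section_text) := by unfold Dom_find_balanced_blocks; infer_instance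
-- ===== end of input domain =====

-- B replaces A's nested while loops (depth counter + index jump) by one flat
-- enumerate pass over the string maintaining a stack of '{' indices (idiomatic; same cost).


-- ===== PORT A =====
-- A's inner `while i < n and depth > 0` loop: structural recursion over the remaining
-- suffix (i < n ↔ suffix nonempty); returns the exit index `end` and the unconsumed suffix
-- so the outer loop can resume at `end` exactly as A does.
def fbbInner : List Char → Int → Int → Int × List Char
  | [], i, _ => (i, [])
  | c :: cs, i, depth =>
    if depth > 0 then
      let depth' := if c = '{' then depth + 1 else if c = '}' then depth - 1 else depth
      fbbInner cs (i + 1) depth'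
    else (i, c :: cs)

theorem fbbInner_suffix_len : ∀ (cs : List Char) (i depth : Int),
    (fbbInner cs i depth).2.length ≤ cs.length := by
  intro cs
  induction cs with
  | nil => intro i depth; simp [fbbInner]
  | cons c cs ih =>
    intro i depth
    simp only [fbbInner]
    split
    · exact le_trans (ih _ _) (Nat.le_succ _)
    · simp

-- A's outer `while i < n` loop over the suffix, keeping the running index i and blocks.
def fbbOuter : List Char → Int → List (Int × Int) → List (Int × Int)
  | [], _, blocks => blocks
  | c :: cs, i, blocks =>
    if c = '{' then
      let r := fbbInner cs (i + 1) 1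
      fbbOuter r.2 r.1 (blocks ++ [(i, r.1)])
    else fbbOuter cs (i + 1) blocks
termination_by cs => cs.length
decreasing_by
  · exact Nat.lt_succ_of_le (fbbInner_suffix_len cs (i + 1) 1)
  · simp

def find_balanced_blocks (section_text : String) : List (Int × Int) :=
  fbbOuter section_text.toList 0 []

-- ===== PORT B =====
-- One fold over enumerate(section_text); the Python list used as a stack (append/pop at
-- the end, stack[0] the bottom) is represented with the top at the list head, so
-- append = cons, pop = tail, stack[0] = getLastD.
def fbbStep (acc : List (Int × Int) × List Int) (p : Int × Char) : List (Int × Int) × List Int :=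
  if p.2 = '{' then (acc.1, p.1 :: acc.2)
  else if p.2 = '}' then
    match acc.2 with
    | [] => acc
    | start :: rest =>
      if rest = [] then (acc.1 ++ [(start, p.1 + 1)], []) else (acc.1, rest)
  else acc

def find_balanced_blocks_alt (section_text : String) : List (Int × Int) :=
  match (PySem.List.enumerate section_text.toList).foldl fbbStep ([], []) with
  | (blocks, []) => blocks
  | (blocks, st) => blocks ++ [(st.getLastD 0, (section_text.toList.length : Int))]

-- ===== PRECONDITION & SPEC =====
def Spec_find_balanced_blocks (section_text : String) (out : List (Int × Int)) : Prop := out = find_balanced_blocks_alt section_text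
instance (section_text : String) (out : List (Int × Int)) : Decidable (Spec_find_balanced_blocks section_text out) := by unfold Spec_find_balanced_blocks; infer_instance

-- ===== CLAIM (what is proved, stated in full; the proofs are below) =====
def Claim_equal_find_balanced_blocks : Prop := ∀ (section_text : String), Dom_find_balanced_blocks section_text → Spec_find_balanced_blocks section_text (find_balanced_blocks section_text)

-- ===== LEMMAS AND PROOFS =====

-- proof-side ghost: does A's inner loop exit because depth reached 0 (block closed)?
def fbbCloses : List Char → Int → Bool
  | [], d => decide (d ≤ 0)
  | c :: cs, d =>
    if d ≤ 0 then true
    else fbbCloses cs (if c = '{' then d + 1 else if c = '}' then d - 1 else d)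

theorem getLastD_ne_nil {l : List Int} (h : l ≠ []) (a : Int) (x y : Int) :
    (a :: l).getLastD x = l.getLastD y := by
  cases l with
  | nil => exact absurd rfl h
  | cons b bs =>
    simp only [List.getLastD_eq_getLast?, List.getLast?_cons_cons]
    obtain ⟨v, hv⟩ := Option.isSome_iff_exists.mp
      (List.getLast?_isSome.mpr (by simp : (b :: bs) ≠ []))
    rw [hv]
    rfl

-- Simulation of A's inner loop by B's fold: while inside a block B's stack has length
-- = depth and a fixed bottom element (the block's start); on close B emits the block
-- and empties the stack, on running out the stack stays nonempty with the same bottom.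
theorem inner_sim : ∀ (cs : List Char) (depth i : Int) (blocks : List (Int × Int)) (st : List Int),
    0 < depth → st.length = depth.toNat →
    (if fbbCloses cs depth then
       (PySem.List.enumerate cs i).foldl fbbStep (blocks, st) =
         (PySem.List.enumerate (fbbInner cs i depth).2 (fbbInner cs i depth).1).foldl fbbStep
           (blocks ++ [(st.getLastD 0, (fbbInner cs i depth).1)], [])
     else
       (fbbInner cs i depth).2 = [] ∧
       ∃ st' : List Int, st' ≠ [] ∧ st'.getLastD 0 = st.getLastD 0 ∧
         (PySem.List.enumerate cs i).foldl fbbStep (blocks, st) = (blocks, st')) := by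
  intro cs
  induction cs with
  | nil =>
    intro depth i blocks st hd hlen
    have hnc : fbbCloses [] depth = false := by simp [fbbCloses]; omega
    rw [hnc]
    simp only [Bool.false_eq_true, if_false]
    refine ⟨by simp [fbbInner], st, ?_, rfl, by simp [PySem.List.enumerate]⟩
    intro h; subst h; simp at hlen; omega
  | cons c cs ih =>
    intro depth i blocks st hd hlen
    have hst : st ≠ [] := by
      intro h; subst h; simp at hlen; omega
    have henum : (PySem.List.enumerate (c :: cs) i).foldl fbbStep (blocks, st)
        = (PySem.List.enumerate cs (i + 1)).foldl fbbStep (fbbStep (blocks, st) (i, c)) := by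
      rw [PySem.List.enumerate_cons]; simp [List.foldl]
    by_cases hbr : c = '{'
    · -- push
      subst hbr
      have hcl : fbbCloses ('{' :: cs) depth = fbbCloses cs (depth + 1) := by
        simp only [fbbCloses]; rw [if_neg (by omega)]; simp
      have hin : fbbInner ('{' :: cs) i depth = fbbInner cs (i + 1) (depth + 1) := by
        simp only [fbbInner]; rw [if_pos hd]; simp
      have hstep : fbbStep (blocks, st) (i, '{') = (blocks, i :: st) := by
        simp [fbbStep]
      rw [hcl, hin, henum, hstep]
      have key := ih (depth + 1) (i + 1) blocks (i :: st) (by omega) (by simp [hlen]; omega)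
      rw [getLastD_ne_nil hst i 0 0] at key
      exact key
    · by_cases hbr2 : c = '}'
      · -- pop
        subst hbr2
        by_cases h1 : depth = 1
        · -- stack becomes empty: B emits the block, A's loop exits with depth 0
          subst h1
          obtain ⟨x, rest, hxr⟩ : ∃ x rest, st = x :: rest := by
            cases st with
            | nil => exact absurd rfl hst
            | cons a b => exact ⟨a, b, rfl⟩
          have hrest : rest = [] := by subst hxr; simp at hlen; omega
          subst hrest; subst hxr
          have hstep : fbbStep (blocks, [x]) (i, '}') = (blocks ++ [(x, i + 1)], []) := by
            simp [fbbStep]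
          have hc : fbbCloses ('}' :: cs) 1 = true := by
            simp only [fbbCloses]
            rw [if_neg (by omega)]
            simp only [reduceIte]
            cases cs <;> simp [fbbCloses]
          have hi : fbbInner ('}' :: cs) i 1 = (i + 1, cs) := by
            simp only [fbbInner]
            rw [if_pos (by omega)]
            simp only [reduceIte]
            cases cs <;> simp [fbbInner]
          rw [hc, if_pos rfl, hi, henum, hstep]
          simp
        · -- depth ≥ 2: pop one element, continue inside the block
          obtain ⟨x, rest, hxr⟩ : ∃ x rest, st = x :: rest := by
            cases st with
            | nil => exact absurd rfl hst
            | cons a b => exact ⟨a, b, rfl⟩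
          have hrest : rest ≠ [] := by
            intro h; subst h; subst hxr; simp at hlen; omega
          have hcl : fbbCloses ('}' :: cs) depth = fbbCloses cs (depth - 1) := by
            simp only [fbbCloses]; rw [if_neg (by omega)]; simp
          have hin : fbbInner ('}' :: cs) i depth = fbbInner cs (i + 1) (depth - 1) := by
            simp only [fbbInner]; rw [if_pos hd]; simp
          have hstep : fbbStep (blocks, st) (i, '}') = (blocks, rest) := by
            subst hxr; simp [fbbStep, hrest]
          rw [hcl, hin, henum, hstep]
          have key := ih (depth - 1) (i + 1) blocks rest (by omega)
            (by subst hxr; simp at hlen; omega)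
          have hbot : rest.getLastD 0 = st.getLastD 0 := by
            subst hxr; exact (getLastD_ne_nil hrest x 0 0).symm
          rw [hbot] at key
          exact key
      · -- other char: state unchanged, depth unchanged
        have hcl : fbbCloses (c :: cs) depth = fbbCloses cs depth := by
          simp only [fbbCloses]; rw [if_neg (by omega)]; simp [hbr, hbr2]
        have hin : fbbInner (c :: cs) i depth = fbbInner cs (i + 1) depth := by
          simp only [fbbInner]; rw [if_pos hd]; simp [hbr, hbr2]
        have hstep : fbbStep (blocks, st) (i, c) = (blocks, st) := by
          simp [fbbStep, hbr, hbr2]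
        rw [hcl, hin, henum, hstep]
        exact ih depth (i + 1) blocks st hd hlen

theorem fbbInner_len : ∀ (cs : List Char) (i depth : Int),
    (fbbInner cs i depth).1 + ((fbbInner cs i depth).2.length : Int) = i + cs.length := by
  intro cs
  induction cs with
  | nil => intro i depth; simp [fbbInner]
  | cons c cs ih =>
    intro i depth
    simp only [fbbInner]
    split
    · rw [ih]; simp only [List.length_cons]; push_cast; ring
    · rfl

-- B's fold from an empty stack, post-processed, equals A's outer loop.
theorem outer_sim : ∀ (m : Nat) (cs : List Char), cs.length ≤ m → ∀ (i : Int) (blocks : List (Int × Int)),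
    (match ((PySem.List.enumerate cs i).foldl fbbStep (blocks, [])) with
     | (bs, []) => bs
     | (bs, st) => bs ++ [(st.getLastD 0, i + (cs.length : Int))]) = fbbOuter cs i blocks := by
  intro m
  induction m with
  | zero =>
    intro cs hm i blocks
    have : cs = [] := by cases cs <;> simp_all
    subst this
    simp [PySem.List.enumerate, fbbOuter]
  | succ m ih =>
    intro cs hm i blocks
    cases cs with
    | nil => simp [PySem.List.enumerate, fbbOuter]
    | cons c cs =>
      simp only [List.length_cons] at hm
      rw [PySem.List.enumerate_cons]
      simp only [List.foldl]
      by_cases hbr : c = '{'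
      · subst hbr
        have hstep : fbbStep (blocks, []) ((i : Int), '{') = (blocks, [i]) := by
          simp [fbbStep]
        rw [hstep]
        have hsim := inner_sim cs 1 (i + 1) blocks [i] (by omega) (by simp)
        have hlen := fbbInner_len cs (i + 1) 1
        have hsuf := fbbInner_suffix_len cs (i + 1) 1
        have hx : ([i] : List Int).getLastD 0 = i := rfl
        rw [hx] at hsim
        simp only [fbbOuter]
        split at hsim
        · -- block closed: resume fold at the returned suffix with the block appended
          rw [hsim]
          have harith : i + (((('{' : Char) :: cs).length : Nat) : Int)
              = (fbbInner cs (i + 1) 1).1 + ((fbbInner cs (i + 1) 1).2.length : Int) := by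
            rw [hlen]; simp only [List.length_cons]; push_cast; ring
          rw [harith]
          exact ih (fbbInner cs (i + 1) 1).2 (by omega)
            (fbbInner cs (i + 1) 1).1 (blocks ++ [(i, (fbbInner cs (i + 1) 1).1)])
        · -- unclosed block: fold leaves a nonempty stack whose bottom is i; end index is n
          obtain ⟨hempty, st', hne, hbot, hfold⟩ := hsim
          rw [hfold]
          have he : (fbbInner cs (i + 1) 1).1 = i + 1 + (cs.length : Int) := by
            rw [hempty] at hlen; simpa using hlen
          rw [hempty, he]
          simp only [fbbOuter]
          cases st' with
          | nil => exact absurd rfl hne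
          | cons a b =>
            rw [hbot, if_pos trivial]
            simp only [List.length_cons]
            congr 2
            push_cast
            ring_nf
      · have hstep : fbbStep (blocks, []) (i, c) = (blocks, []) := by
          by_cases hbr2 : c = '}' <;> simp [fbbStep, hbr, hbr2]
        rw [hstep]
        have hL : i + (((c :: cs).length : Nat) : Int) = (i + 1) + (cs.length : Int) := by
          simp only [List.length_cons]; push_cast; ring
        rw [hL]
        simp only [fbbOuter, if_neg hbr]
        exact ih cs (by omega) (i + 1) blocks

-- ===== VERDICT (by name: the statement is the Claim_ definition above) =====
theorem find_balanced_blocks_spec : Claim_equal_find_balanced_blocks := by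
  intro s _
  unfold Spec_find_balanced_blocks find_balanced_blocks find_balanced_blocks_alt
  have h := outer_sim s.toList.length s.toList le_rfl 0 []
  simp only [zero_add] at h
  exact h.symm
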